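-- pv_equiv track=rewrite | github.com/SANJAIB2004/DSA_python | Recursion/RatinMaze.py | RatinMaze
-- ===== SOURCE A (Python) =====
-- def solve(i,j,mat,n,ans,move,vis,di,dj):
--     if i==n-1 and j ==n-1:
--         ans.append(move)
--         return
--
--     dir= "DLRU"
--     # dir = "DR"
--     for index in range(4):
--         nexti = i+di[index]
--         nextj = j+dj[index]
--         if nexti>=0 and nextj>=0 and nexti<n and nextj<n and vis[nexti][nextj]==0 and mat[nexti][nextj]==1:
--             vis[i][j]=1
--             solve(nexti,nextj,mat,n,ans,move+dir[index],vis,di,dj)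
--             vis[i][j]=0
--
-- def RatinMaze(mat,n):
--     ans = []
--     vis = [[0 for _ in range(n)] for _ in range(n)]
--     di = [1,0,0,-1]
--     dj = [0,-1,1,0]
--     # di = [1,0]
--     # dj = [0,1]
--     if mat[0][0]==1:
--         solve(0,0,mat,n,ans,"",vis,di,dj)
--         return ans
-- ===== SOURCE B (Python) =====
-- def RatinMaze(mat, n):
--     # Pure recursive enumeration: builds each path's suffix list and prepends
--     # the direction character, with an immutable frozenset of blocked cells
--     # instead of a mutable visited matrix and a shared answer accumulator.
--     if mat[0][0] != 1:
--         return None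
--     def paths(i, j, blocked):
--         if i == n - 1 and j == n - 1:
--             return [""]
--         blocked = blocked | {(i, j)}
--         out = []
--         for d, ni, nj in (("D", i + 1, j), ("L", i, j - 1), ("R", i, j + 1), ("U", i - 1, j)):
--             if 0 <= ni < n and 0 <= nj < n and (ni, nj) not in blocked and mat[ni][nj] == 1:
--                 out += [d + s for s in paths(ni, nj, blocked)]
--         return out
--     return paths(0, 0, frozenset())
-- ===== Notes on version B (the rewrite author's own statement) =====
-- stated objective: alternative
-- what changed: Replaces A's recursion over a shared mutable answer list and a mutable n×n visited matrix with a pure recursion that returns the list of move-suffixes from each cell and prepends the direction character, tracking the path's cells in an immutable frozenset; B also never builds the n×n zero matrix A allocates up front.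
-- outside the precondition, e.g. on RatinMaze([[1, 0], [0]], 2): A returns [], B returns []
import Mathlib
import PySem

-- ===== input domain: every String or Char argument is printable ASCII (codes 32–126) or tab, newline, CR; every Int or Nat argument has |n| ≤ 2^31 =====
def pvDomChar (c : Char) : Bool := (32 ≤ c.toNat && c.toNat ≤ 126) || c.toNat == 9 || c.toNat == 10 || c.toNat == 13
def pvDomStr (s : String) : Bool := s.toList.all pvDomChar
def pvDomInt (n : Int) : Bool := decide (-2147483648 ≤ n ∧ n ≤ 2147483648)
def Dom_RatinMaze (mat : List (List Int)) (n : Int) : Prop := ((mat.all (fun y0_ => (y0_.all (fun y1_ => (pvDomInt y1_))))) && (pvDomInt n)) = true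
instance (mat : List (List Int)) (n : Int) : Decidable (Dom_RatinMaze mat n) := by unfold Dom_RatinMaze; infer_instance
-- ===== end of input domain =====

-- B replaces A's shared mutable answer list and visited matrix with a pure recursion that
-- returns each path's move-suffix list and prepends the direction character (visited = an
-- immutable set of blocked cells); same return value, different decomposition.

-- ===== PORT A =====

-- m[i][j] in total form (defaults instead of IndexError); every index actually evaluated is
-- in range on inputs admitted by Pre_RatinMaze, where this is exact.
def pvCell (m : List (List Int)) (i j : Int) : Int := (m.getD i.toNat []).getD j.toNat 0

-- vis[i][j] = v (indices are nonnegative and in range wherever A executes this)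
def pvVisSet (vis : List (List Int)) (i j : Int) (v : Int) : List (List Int) :=
  vis.set i.toNat ((vis.getD i.toNat []).set j.toNat v)

-- A's `solve`: vis is threaded functionally — Python's paired vis[i][j]=1 / vis[i][j]=0 means
-- each recursive call sees vis with (i,j) marked and solve restores vis before returning, so
-- passing (pvVisSet vis i j 1) down is exact.  `fuel` is only a totality guard (the recursion
-- marks a fresh grid cell at each level, so it is never exhausted on the inputs Pre_ admits).
def pvSolve (mat : List (List Int)) (n : Int) (di dj : List Int) :
    Nat → Int → Int → String → List (List Int) → List String
  | 0, _, _, _, _ => []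
  | fuel + 1, i, j, move, vis =>
    if i = n - 1 ∧ j = n - 1 then [move]
    else
      let dir := "DLRU"
      (PySem.List.pyRange 0 4 1).foldl
        (fun ans index =>
          let nexti := i + PySem.List.pyGetD di index 0
          let nextj := j + PySem.List.pyGetD dj index 0
          if 0 ≤ nexti ∧ 0 ≤ nextj ∧ nexti < n ∧ nextj < n ∧
              pvCell vis nexti nextj = 0 ∧ pvCell mat nexti nextj = 1 then
            -- move + dir[index]; index ∈ {0,1,2,3} so the .getD default never fires
            ans ++ pvSolve mat n di dj fuel nexti nextj
                (move ++ String.ofList [(PySem.Str.pyGet? dir index).getD 'D'])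
                (pvVisSet vis i j 1)
          else ans)
        []

def RatinMaze (mat : List (List Int)) (n : Int) : Option (List String) :=
  let vis := (PySem.List.pyRange 0 n 1).map
      (fun _ => (PySem.List.pyRange 0 n 1).map (fun _ => (0 : Int)))
  let di : List Int := [1, 0, 0, -1]
  let dj : List Int := [0, -1, 1, 0]
  if pvCell mat 0 0 = 1 then
    some (pvSolve mat n di dj (n.toNat * n.toNat + 1) 0 0 "" vis)
  else
    none

-- ===== PORT B =====

-- B's `paths`: returns the list of move-suffixes from (i,j); blocked is the immutable set of
-- cells already on the current path.  Same fuel-style totality guard as in port A.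
def pvPaths (mat : List (List Int)) (n : Int) :
    Nat → Int → Int → PySem.Set (Int × Int) → List String
  | 0, _, _, _ => []
  | fuel + 1, i, j, blocked =>
    if i = n - 1 ∧ j = n - 1 then [""]
    else
      let blocked' : PySem.Set (Int × Int) := PySem.Set.add blocked (i, j)
      [("D", i + 1, j), ("L", i, j - 1), ("R", i, j + 1), ("U", i - 1, j)].foldl
        (fun out t =>
          if 0 ≤ t.2.1 ∧ t.2.1 < n ∧ 0 ≤ t.2.2 ∧ t.2.2 < n ∧
              (t.2.1, t.2.2) ∉ blocked' ∧ pvCell mat t.2.1 t.2.2 = 1 then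
            out ++ (pvPaths mat n fuel t.2.1 t.2.2 blocked').map (fun s => t.1 ++ s)
          else out)
        []

def RatinMaze_alt (mat : List (List Int)) (n : Int) : Option (List String) :=
  if pvCell mat 0 0 ≠ 1 then none
  else some (pvPaths mat n (n.toNat * n.toNat + 1) 0 0 PySem.Set.empty)

-- ===== PRECONDITION & SPEC =====

-- Pre_ excludes inputs where mat[0][0] raises and — when the search actually runs
-- (mat[0][0]==1 and n>0) — grids whose first n rows are not all of length ≥ n: on such grids
-- A raises IndexError whenever the search touches a missing cell, and the ragged-but-
-- unreachable cases are excluded with them (there A and B still return the same value).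
def Pre_RatinMaze (mat : List (List Int)) (n : Int) : Prop :=
  mat ≠ [] ∧ mat.headI ≠ [] ∧
  ((mat.headI.headI = 1 ∧ 0 < n) →
    n ≤ (mat.length : Int) ∧ ∀ row ∈ mat.take n.toNat, n ≤ (row.length : Int))

instance (mat : List (List Int)) (n : Int) : Decidable (Pre_RatinMaze mat n) := by
  unfold Pre_RatinMaze; infer_instance

def pvWitness_RatinMaze : List (List Int) × Int := ([[1, 1], [1, 1]], 2)

def Spec_RatinMaze (mat : List (List Int)) (n : Int) (out : Option (List String)) : Prop :=
  out = RatinMaze_alt mat n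
instance (mat : List (List Int)) (n : Int) (out : Option (List String)) :
    Decidable (Spec_RatinMaze mat n out) := by unfold Spec_RatinMaze; infer_instance

-- ===== CLAIM (what is proved, stated in full; the proofs are below) =====
def Claim_equal_RatinMaze : Prop :=
  ∀ (mat : List (List Int)) (n : Int),
    Dom_RatinMaze mat n → Pre_RatinMaze mat n → Spec_RatinMaze mat n (RatinMaze mat n)

-- ===== LEMMAS AND PROOFS =====
theorem pvSolve_succ (mat : List (List Int)) (n : Int) (fuel : Nat) (i j : Int)
    (move : String) (vis : List (List Int)) :
    pvSolve mat n [1, 0, 0, -1] [0, -1, 1, 0] (fuel + 1) i j move vis =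
      if i = n - 1 ∧ j = n - 1 then [move]
      else
        (if 0 ≤ i + 1 ∧ 0 ≤ j ∧ i + 1 < n ∧ j < n ∧ pvCell vis (i+1) j = 0 ∧ pvCell mat (i+1) j = 1 then
            pvSolve mat n [1,0,0,-1] [0,-1,1,0] fuel (i+1) j (move ++ "D") (pvVisSet vis i j 1) else []) ++
        ((if 0 ≤ i ∧ 0 ≤ j - 1 ∧ i < n ∧ j - 1 < n ∧ pvCell vis i (j-1) = 0 ∧ pvCell mat i (j-1) = 1 then
            pvSolve mat n [1,0,0,-1] [0,-1,1,0] fuel i (j-1) (move ++ "L") (pvVisSet vis i j 1) else []) ++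
        ((if 0 ≤ i ∧ 0 ≤ j + 1 ∧ i < n ∧ j + 1 < n ∧ pvCell vis i (j+1) = 0 ∧ pvCell mat i (j+1) = 1 then
            pvSolve mat n [1,0,0,-1] [0,-1,1,0] fuel i (j+1) (move ++ "R") (pvVisSet vis i j 1) else []) ++
        (if 0 ≤ i - 1 ∧ 0 ≤ j ∧ i - 1 < n ∧ j < n ∧ pvCell vis (i-1) j = 0 ∧ pvCell mat (i-1) j = 1 then
            pvSolve mat n [1,0,0,-1] [0,-1,1,0] fuel (i-1) j (move ++ "U") (pvVisSet vis i j 1) else []))) := by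
  rw [show (pvSolve mat n [1,0,0,-1] [0,-1,1,0] (fuel+1)) = fun i j move vis =>
    (if i = n - 1 ∧ j = n - 1 then [move]
    else
      (PySem.List.pyRange 0 4 1).foldl
        (fun ans index =>
          let nexti := i + PySem.List.pyGetD [1,0,0,-1] index 0
          let nextj := j + PySem.List.pyGetD [0,-1,1,0] index 0
          if 0 ≤ nexti ∧ 0 ≤ nextj ∧ nexti < n ∧ nextj < n ∧
              pvCell vis nexti nextj = 0 ∧ pvCell mat nexti nextj = 1 then
            ans ++ pvSolve mat n [1,0,0,-1] [0,-1,1,0] fuel nexti nextj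
                (move ++ String.ofList [(PySem.Str.pyGet? "DLRU" index).getD 'D'])
                (pvVisSet vis i j 1)
          else ans)
        []) from rfl]
  rw [show PySem.List.pyRange 0 4 1 = [(0:Int),1,2,3] from by decide]
  simp only [List.foldl,
    show PySem.List.pyGetD [(1:Int),0,0,-1] 0 0 = 1 from by decide,
    show PySem.List.pyGetD [(1:Int),0,0,-1] 1 0 = 0 from by decide,
    show PySem.List.pyGetD [(1:Int),0,0,-1] 2 0 = 0 from by decide,
    show PySem.List.pyGetD [(1:Int),0,0,-1] 3 0 = -1 from by decide,
    show PySem.List.pyGetD [(0:Int),-1,1,0] 0 0 = 0 from by decide,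
    show PySem.List.pyGetD [(0:Int),-1,1,0] 1 0 = -1 from by decide,
    show PySem.List.pyGetD [(0:Int),-1,1,0] 2 0 = 1 from by decide,
    show PySem.List.pyGetD [(0:Int),-1,1,0] 3 0 = 0 from by decide,
    show String.ofList [(PySem.Str.pyGet? "DLRU" 0).getD 'D'] = "D" from by decide,
    show String.ofList [(PySem.Str.pyGet? "DLRU" 1).getD 'D'] = "L" from by decide,
    show String.ofList [(PySem.Str.pyGet? "DLRU" 2).getD 'D'] = "R" from by decide,
    show String.ofList [(PySem.Str.pyGet? "DLRU" 3).getD 'D'] = "U" from by decide]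
  simp only [add_zero, ← sub_eq_add_neg]
  congr 1
  split_ifs <;> simp

theorem pvPaths_succ (mat : List (List Int)) (n : Int) (fuel : Nat) (i j : Int)
    (blocked : PySem.Set (Int × Int)) :
    pvPaths mat n (fuel + 1) i j blocked =
      if i = n - 1 ∧ j = n - 1 then [""]
      else
        (if 0 ≤ i + 1 ∧ i + 1 < n ∧ 0 ≤ j ∧ j < n ∧ (i+1, j) ∉ PySem.Set.add blocked (i, j) ∧ pvCell mat (i+1) j = 1 then
            (pvPaths mat n fuel (i+1) j (PySem.Set.add blocked (i, j))).map (fun s => "D" ++ s) else []) ++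
        ((if 0 ≤ i ∧ i < n ∧ 0 ≤ j - 1 ∧ j - 1 < n ∧ (i, j-1) ∉ PySem.Set.add blocked (i, j) ∧ pvCell mat i (j-1) = 1 then
            (pvPaths mat n fuel i (j-1) (PySem.Set.add blocked (i, j))).map (fun s => "L" ++ s) else []) ++
        ((if 0 ≤ i ∧ i < n ∧ 0 ≤ j + 1 ∧ j + 1 < n ∧ (i, j+1) ∉ PySem.Set.add blocked (i, j) ∧ pvCell mat i (j+1) = 1 then
            (pvPaths mat n fuel i (j+1) (PySem.Set.add blocked (i, j))).map (fun s => "R" ++ s) else []) ++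
        (if 0 ≤ i - 1 ∧ i - 1 < n ∧ 0 ≤ j ∧ j < n ∧ (i-1, j) ∉ PySem.Set.add blocked (i, j) ∧ pvCell mat (i-1) j = 1 then
            (pvPaths mat n fuel (i-1) j (PySem.Set.add blocked (i, j))).map (fun s => "U" ++ s) else []))) := by
  conv_lhs => rw [pvPaths]
  simp only [List.foldl]
  congr 1
  split_ifs <;> simp

def pvShape (n : Int) (vis : List (List Int)) : Prop :=
  vis.length = n.toNat ∧ ∀ r ∈ vis, r.length = n.toNat

def pvAgree (n : Int) (vis : List (List Int)) (blocked : List (Int × Int)) : Prop :=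
  ∀ a b : Int, 0 ≤ a → a < n → 0 ≤ b → b < n →
    pvCell vis a b = (if (a, b) ∈ blocked then 1 else 0)

theorem pvRowLen {n : Int} {vis : List (List Int)} (h : pvShape n vis)
    {k : Nat} (hk : k < vis.length) : (vis.getD k []).length = n.toNat := by
  rw [List.getD_eq_getElem?_getD, List.getElem?_eq_getElem hk]
  exact h.2 _ (List.getElem_mem hk)

theorem pvShape_set {n : Int} {vis : List (List Int)} (h : pvShape n vis)
    {i j : Int} (hi0 : 0 ≤ i) (hin : i < n) (v : Int) :
    pvShape n (pvVisSet vis i j v) := by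
  have hlen : vis.length = n.toNat := h.1
  have hil : i.toNat < vis.length := by omega
  refine ⟨by simpa [pvVisSet] using h.1, ?_⟩
  intro r hr
  rcases List.mem_or_eq_of_mem_set hr with hm | rfl
  · exact h.2 r hm
  · simpa using pvRowLen h hil

theorem pvCell_pvVisSet {n : Int} {vis : List (List Int)} (h : pvShape n vis)
    {i j a b : Int} (hi0 : 0 ≤ i) (hin : i < n) (hj0 : 0 ≤ j) (hjn : j < n)
    (ha0 : 0 ≤ a) (han : a < n) (hb0 : 0 ≤ b) (hbn : b < n) (v : Int) :
    pvCell (pvVisSet vis i j v) a b = if a = i ∧ b = j then v else pvCell vis a b := by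
  have hlen : vis.length = n.toNat := h.1
  have hil : i.toNat < vis.length := by omega
  have hal : a.toNat < vis.length := by omega
  have hjl : j.toNat < (vis.getD i.toNat []).length := by rw [pvRowLen h hil]; omega
  unfold pvCell pvVisSet
  simp only [List.getD_eq_getElem?_getD] at hjl ⊢
  by_cases hai : a = i
  · subst hai
    rw [List.getElem?_set_self hal, Option.getD_some]
    by_cases hbj : b = j
    · subst hbj
      rw [List.getElem?_set_self hjl, Option.getD_some]
      simp
    · rw [List.getElem?_set_ne (by omega : j.toNat ≠ b.toNat)]
      simp [hbj]
  · rw [List.getElem?_set_ne (by omega : i.toNat ≠ a.toNat)]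
    simp [hai]

theorem pvMain (mat : List (List Int)) (n : Int) :
    ∀ (fuel : Nat) (i j : Int) (move : String) (vis : List (List Int))
      (blocked : PySem.Set (Int × Int)),
      pvShape n vis → pvAgree n vis blocked →
      0 ≤ i → i < n → 0 ≤ j → j < n →
      pvSolve mat n [1, 0, 0, -1] [0, -1, 1, 0] fuel i j move vis =
        (pvPaths mat n fuel i j blocked).map (fun s => move ++ s) := by
  intro fuel
  induction fuel with
  | zero => intro i j move vis blocked _ _ _ _ _ _; simp [pvSolve, pvPaths]
  | succ fuel IH =>
    intro i j move vis blocked hsh hag hi0 hin hj0 hjn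
    rw [pvSolve_succ, pvPaths_succ]
    by_cases hgoal : i = n - 1 ∧ j = n - 1
    · simp [hgoal]
    · rw [if_neg hgoal, if_neg hgoal]
      have hsh' : pvShape n (pvVisSet vis i j 1) := pvShape_set hsh hi0 hin 1
      have hag' : pvAgree n (pvVisSet vis i j 1) (PySem.Set.add blocked (i, j)) := by
        intro a b ha0 han hb0 hbn
        rw [pvCell_pvVisSet hsh hi0 hin hj0 hjn ha0 han hb0 hbn]
        by_cases hij : a = i ∧ b = j
        · obtain ⟨rfl, rfl⟩ := hij
          simp [PySem.Set.mem_add]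
        · rw [if_neg hij, hag a b ha0 han hb0 hbn]
          have : ((a, b) ∈ PySem.Set.add blocked (i, j)) ↔ (a, b) ∈ blocked := by
            rw [PySem.Set.mem_add]
            constructor
            · rintro (hm | he)
              · exact hm
              · exact absurd ⟨congrArg Prod.fst he, congrArg Prod.snd he⟩ hij
            · exact Or.inl
          simp [this]
      have seg : ∀ (d : String) (ni nj : Int), (ni ≠ i ∨ nj ≠ j) →
          (if 0 ≤ ni ∧ 0 ≤ nj ∧ ni < n ∧ nj < n ∧ pvCell vis ni nj = 0 ∧ pvCell mat ni nj = 1 then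
             pvSolve mat n [1,0,0,-1] [0,-1,1,0] fuel ni nj (move ++ d) (pvVisSet vis i j 1) else []) =
          (if 0 ≤ ni ∧ ni < n ∧ 0 ≤ nj ∧ nj < n ∧ (ni, nj) ∉ PySem.Set.add blocked (i, j) ∧ pvCell mat ni nj = 1 then
             (pvPaths mat n fuel ni nj (PySem.Set.add blocked (i, j))).map (fun s => d ++ s) else []).map
            (fun s => move ++ s) := by
        intro d ni nj hnij
        by_cases hg : 0 ≤ ni ∧ ni < n ∧ 0 ≤ nj ∧ nj < n ∧ (ni, nj) ∉ blocked ∧ pvCell mat ni nj = 1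
        · obtain ⟨h1, h2, h3, h4, h5, h6⟩ := hg
          have hmem' : (ni, nj) ∉ PySem.Set.add blocked (i, j) := by
            rw [PySem.Set.mem_add]
            rintro (hm | he)
            · exact h5 hm
            · rcases hnij with hne | hne
              · exact hne (congrArg Prod.fst he)
              · exact hne (congrArg Prod.snd he)
          have hcell : pvCell vis ni nj = 0 := by
            rw [hag ni nj h1 h2 h3 h4, if_neg h5]
          rw [if_pos ⟨h1, h3, h2, h4, hcell, h6⟩, if_pos ⟨h1, h2, h3, h4, hmem', h6⟩]
          rw [IH ni nj (move ++ d) _ _ hsh' hag' h1 h2 h3 h4]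
          simp [List.map_map, Function.comp, String.append_assoc]
        · have hA : ¬(0 ≤ ni ∧ 0 ≤ nj ∧ ni < n ∧ nj < n ∧ pvCell vis ni nj = 0 ∧ pvCell mat ni nj = 1) := by
            rintro ⟨h1, h3, h2, h4, hc, h6⟩
            apply hg
            refine ⟨h1, h2, h3, h4, ?_, h6⟩
            rw [hag ni nj h1 h2 h3 h4] at hc
            by_contra hmem
            simp [hmem] at hc
          have hB : ¬(0 ≤ ni ∧ ni < n ∧ 0 ≤ nj ∧ nj < n ∧ (ni, nj) ∉ PySem.Set.add blocked (i, j) ∧ pvCell mat ni nj = 1) := by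
            rintro ⟨h1, h2, h3, h4, hm, h6⟩
            exact hg ⟨h1, h2, h3, h4, fun hmem => hm (by rw [PySem.Set.mem_add]; exact Or.inl hmem), h6⟩
          rw [if_neg hA, if_neg hB]
          simp
      rw [seg "D" (i+1) j (Or.inl (by omega)), seg "L" i (j-1) (Or.inr (by omega)),
          seg "R" i (j+1) (Or.inr (by omega)), seg "U" (i-1) j (Or.inl (by omega))]
      simp [List.map_append]

theorem pvCell_zeroGrid (n a b : Int) :
    pvCell ((PySem.List.pyRange 0 n 1).map
      (fun _ => (PySem.List.pyRange 0 n 1).map (fun _ => (0 : Int)))) a b = 0 := by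
  unfold pvCell
  simp only [List.getD_eq_getElem?_getD, List.getElem?_map]
  cases (PySem.List.pyRange 0 n 1)[a.toNat]? <;> simp

theorem pvShape_zeroGrid (n : Int) :
    pvShape n ((PySem.List.pyRange 0 n 1).map
      (fun _ => (PySem.List.pyRange 0 n 1).map (fun _ => (0 : Int)))) := by
  constructor
  · simp [PySem.List.length_pyRange_one]
  · intro r hr
    rcases List.mem_map.1 hr with ⟨x, _, rfl⟩
    simp [PySem.List.length_pyRange_one]

theorem pvEq (mat : List (List Int)) (n : Int) : RatinMaze mat n = RatinMaze_alt mat n := by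
  unfold RatinMaze RatinMaze_alt
  by_cases h0 : pvCell mat 0 0 = 1
  · rw [if_pos h0, if_neg (by simp [h0])]
    refine congrArg some ?_
    by_cases hn : 0 < n
    · rw [pvMain mat n _ 0 0 "" _ PySem.Set.empty (pvShape_zeroGrid n)
        (fun a b ha0 han hb0 hbn => by rw [pvCell_zeroGrid]; simp [PySem.Set.empty])
        le_rfl hn le_rfl hn]
      simp
    · have hfuel : n.toNat * n.toNat + 1 = 0 + 1 := by
        have : n.toNat = 0 := by omega
        simp [this]
      rw [hfuel]
      have hA : pvSolve mat n [1, 0, 0, -1] [0, -1, 1, 0] (0 + 1) 0 0 ""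
          ((PySem.List.pyRange 0 n 1).map
            (fun _ => (PySem.List.pyRange 0 n 1).map (fun _ => (0 : Int)))) = [] := by
        rw [pvSolve_succ,
          if_neg (by rintro ⟨h, -⟩; omega),
          if_neg (by rintro ⟨-, -, h, -⟩; omega),
          if_neg (by rintro ⟨-, h, -⟩; omega),
          if_neg (by rintro ⟨-, -, -, h, -⟩; omega),
          if_neg (by rintro ⟨h, -⟩; omega)]
        simp
      have hB : pvPaths mat n (0 + 1) 0 0 PySem.Set.empty = [] := by
        rw [pvPaths_succ,
          if_neg (by rintro ⟨h, -⟩; omega),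
          if_neg (by rintro ⟨-, h, -⟩; omega),
          if_neg (by rintro ⟨-, h, -⟩; omega),
          if_neg (by rintro ⟨-, h, -⟩; omega),
          if_neg (by rintro ⟨h, -⟩; omega)]
        simp
      rw [hA, hB]
  · rw [if_neg h0, if_pos h0]

-- ===== VERDICT (by name: the statement is the Claim_ definition above) =====
theorem RatinMaze_spec : Claim_equal_RatinMaze := by
  intro mat n _hdom _hpre
  unfold Spec_RatinMaze
  exact pvEq mat n
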